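-- pv_equiv track=rewrite | github.com/thetringuyen/Project-Euler | pe35.py | rotateBCD
-- ===== SOURCE A (Python) =====
-- def rotateBCD(n):
--     m = n >> 4
--     res = n & 0xF
--     while m > 0:
--         res <<= 4
--         m >>= 4
--     res |= (n >> 4)
--     return res
-- ===== SOURCE B (Python) =====
-- def rotateBCD(n):
--     low = n & 0xF
--     rest = n >> 4
--     shift = 4 * ((rest.bit_length() + 3) // 4) if rest > 0 else 0
--     return (low << shift) | rest
-- ===== Notes on version B (the rewrite author's own statement) =====
-- stated objective: simpler
-- what changed: Replaced A's nibble-by-nibble while-loop (shifting res left 4 per iteration) with a closed-form shift amount computed from bit_length: shift = 4*ceil(bit_length(rest)/4) when rest > 0, else 0.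
import Mathlib
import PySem

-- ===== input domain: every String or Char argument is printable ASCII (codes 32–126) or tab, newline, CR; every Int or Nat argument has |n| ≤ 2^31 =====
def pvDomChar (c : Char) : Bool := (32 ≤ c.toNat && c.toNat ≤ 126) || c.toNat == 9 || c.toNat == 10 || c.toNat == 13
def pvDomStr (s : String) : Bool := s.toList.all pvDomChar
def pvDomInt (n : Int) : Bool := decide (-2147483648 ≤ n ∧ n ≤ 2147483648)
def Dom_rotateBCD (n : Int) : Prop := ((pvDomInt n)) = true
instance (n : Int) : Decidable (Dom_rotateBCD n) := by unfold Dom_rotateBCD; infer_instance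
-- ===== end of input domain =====

-- B replaces A's nibble-counting while-loop with a closed-form shift from bit_length (simpler).

-- ===== PORT A =====
-- the 'while m > 0: res <<= 4; m >>= 4' loop of A
def rotLoopA (m res : Int) : Int :=
  if h : m > 0 then rotLoopA (m >>> (4:Nat)) (res <<< (4:Nat)) else res
  termination_by m.toNat
  decreasing_by
    have h16 : m >>> (4:Nat) = m / 16 := by
      have : m >>> (4:Nat) = m / (2 ^ 4 : Nat) := Int.shiftRight_eq_div_pow m 4
      simpa using this
    omega

def rotateBCD (n : Int) : Int :=
  PySem.Int.bor (rotLoopA (n >>> (4:Nat)) (PySem.Int.band n 0xF)) (n >>> (4:Nat))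

-- ===== PORT B =====
def rotateBCD_alt (n : Int) : Int :=
  let low := PySem.Int.band n 0xF
  let rest := n >>> (4:Nat)
  let shift : Nat := if rest > 0 then 4 * ((PySem.Int.bitLength rest + 3) / 4) else 0
  PySem.Int.bor (low <<< shift) rest

-- ===== PRECONDITION & SPEC =====
def Spec_rotateBCD (n : Int) (out : Int) : Prop := out = rotateBCD_alt n
instance (n : Int) (out : Int) : Decidable (Spec_rotateBCD n out) := by unfold Spec_rotateBCD; infer_instance

-- ===== CLAIM (what is proved, stated in full; the proofs are below) =====
def Claim_equal_rotateBCD : Prop := ∀ (n : Int), Dom_rotateBCD n → Spec_rotateBCD n (rotateBCD n)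

-- ===== LEMMAS AND PROOFS =====

-- the closed-form shift amount B uses
def nibShift (m : Int) : Nat := if m > 0 then 4 * ((PySem.Int.bitLength m + 3) / 4) else 0

theorem shiftRight4_eq (m : Int) : m >>> (4:Nat) = m / 16 := by
  have : m >>> (4:Nat) = m / (2 ^ 4 : Nat) := Int.shiftRight_eq_div_pow m 4
  simpa using this

theorem bitLength_div16 (m : Int) (h : 16 ≤ m) :
    PySem.Int.bitLength m = PySem.Int.bitLength (m / 16) + 4 := by
  have h1 : PySem.Int.floordiv m 2 = m / 2 := PySem.Int.floordiv_eq_ediv_of_pos (by omega)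
  have h2 : PySem.Int.floordiv (m / 2) 2 = m / 2 / 2 := PySem.Int.floordiv_eq_ediv_of_pos (by omega)
  have h3 : PySem.Int.floordiv (m / 2 / 2) 2 = m / 2 / 2 / 2 := PySem.Int.floordiv_eq_ediv_of_pos (by omega)
  have h4 : PySem.Int.floordiv (m / 2 / 2 / 2) 2 = m / 2 / 2 / 2 / 2 := PySem.Int.floordiv_eq_ediv_of_pos (by omega)
  have e : m / 2 / 2 / 2 / 2 = m / 16 := by omega
  rw [PySem.Int.bitLength_of_pos (show (0:Int) < m by omega), h1,
      PySem.Int.bitLength_of_pos (show (0:Int) < m / 2 by omega), h2,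
      PySem.Int.bitLength_of_pos (show (0:Int) < m / 2 / 2 by omega), h3,
      PySem.Int.bitLength_of_pos (show (0:Int) < m / 2 / 2 / 2 by omega), h4, e]

theorem nibShift_step (m : Int) (h : 0 < m) : nibShift m = 4 + nibShift (m >>> (4:Nat)) := by
  rw [shiftRight4_eq]
  by_cases h16 : 16 ≤ m
  · have hq : 0 < m / 16 := by omega
    have hbl := bitLength_div16 m h16
    simp only [nibShift, if_pos h, if_pos hq, hbl]
    omega
  · -- 0 < m < 16 : m / 16 = 0, bitLength m ∈ [1,4]
    have hq : m / 16 = 0 := by omega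
    have hub : PySem.Int.bitLength m ≤ 4 := by
      by_contra hc
      have h5 : 5 ≤ PySem.Int.bitLength m := by omega
      have := PySem.Int.two_pow_bitLength_le m (by omega)
      have hpow : (2 : Nat) ^ 4 ≤ 2 ^ (PySem.Int.bitLength m - 1) :=
        Nat.pow_le_pow_right (by omega) (by omega)
      have hna : m.natAbs ≤ 15 := by omega
      omega
    have hlb : 1 ≤ PySem.Int.bitLength m := by
      by_contra hc
      have h0 : PySem.Int.bitLength m = 0 := by omega
      have := PySem.Int.lt_two_pow_bitLength m
      rw [h0] at this
      have : m.natAbs < 1 := by simpa using this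
      omega
    simp only [nibShift, if_pos h, hq]
    norm_num
    omega

theorem shiftLeft_shiftLeft (r : Int) (a b : Nat) : (r <<< a) <<< b = r <<< (a + b) := by
  simp [Int.shiftLeft_eq, pow_add, mul_assoc]

theorem rotLoopA_eq (m res : Int) : rotLoopA m res = res <<< nibShift m := by
  by_cases h : 0 < m
  · rw [rotLoopA, dif_pos h, rotLoopA_eq (m >>> (4:Nat)) (res <<< (4:Nat)), shiftLeft_shiftLeft,
        nibShift_step m h]
  · rw [rotLoopA, dif_neg h]
    simp [nibShift, h]
  termination_by m.toNat
  decreasing_by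
    have := shiftRight4_eq m
    omega

-- ===== VERDICT (by name: the statement is the Claim_ definition above) =====
theorem rotateBCD_spec : Claim_equal_rotateBCD := by
  intro n _
  show rotateBCD n = rotateBCD_alt n
  unfold rotateBCD rotateBCD_alt
  rw [rotLoopA_eq]
  rfl
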